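-- pv_equiv track=rewrite | github.com/minjundev/Kakao-Coding-Test | Level 2/1_문자열 압축.py | solution
-- ===== SOURCE A (Python) =====
-- def solution(s):
--     answer = 0
--     array = []
--     array.append(s)
--
--
--     for i in range(1,int(len(s)/2)+1) :
--         cnt = 0
--         tmp = ""
--         token = s[:i]
--         j = 0
--         while j < len(s)+1 :
--             if s[j:j+i] == token :
--                 cnt += 1
--                 j += i
--             else :
--                 if cnt != 1 :
--                     tmp += str(cnt) + token
--                 else :
--                     tmp += token
--
--                 if(len(s) - j < len(token)) :
--                     tmp += s[j:]
--                     break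
--                 token = s[j:j+i]
--                 cnt = 0
--
--                 continue
--         array.append(tmp)
--
--
--     for i in range(0,len(array)) :
--         array[i] = len(array[i])
--
--     answer = min(array)
--     return answer
-- ===== SOURCE B (Python) =====
-- def solution(s):
--     n = len(s)
--     best = n
--     for i in range(1, n // 2 + 1):
--         chunks = []
--         t = s
--         while t:
--             chunks.append(t[:i])
--             t = t[i:]
--         total = 0
--         prev = chunks[0]
--         count = 1
--         for c in chunks[1:]:
--             if c == prev:
--                 count += 1
--             else:
--                 total += (len(str(count)) if count > 1 else 0) + len(prev)
--                 prev = c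
--                 count = 1
--         total += (len(str(count)) if count > 1 else 0) + len(prev)
--         best = min(best, total)
--     return best
-- ===== Notes on version B (the rewrite author's own statement) =====
-- stated objective: simpler
-- what changed: Replaces A's index/pointer while-loop with continue-driven resets and explicit compressed-string construction by splitting s into a chunk list, grouping consecutive equal chunks in one pass, and accumulating the compressed LENGTH as a number (never building the compressed string).
import Mathlib
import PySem

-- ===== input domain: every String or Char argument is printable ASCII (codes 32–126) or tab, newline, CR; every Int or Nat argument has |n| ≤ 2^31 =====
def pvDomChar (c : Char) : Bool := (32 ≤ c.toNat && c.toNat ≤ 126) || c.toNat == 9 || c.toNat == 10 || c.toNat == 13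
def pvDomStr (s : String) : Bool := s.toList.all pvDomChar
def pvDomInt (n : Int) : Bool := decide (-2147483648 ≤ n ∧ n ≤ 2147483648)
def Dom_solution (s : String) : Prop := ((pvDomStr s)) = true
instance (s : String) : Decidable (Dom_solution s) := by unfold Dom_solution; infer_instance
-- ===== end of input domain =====

-- B replaces A's pointer/continue while-loop and string building by a chunk-list grouping pass
-- that accumulates the compressed length numerically (objective: simpler).


-- ===== PORT A =====
-- A's inner while loop; slices s[j:j+i], s[:i], s[j:] are ported as drop/take, exact for these
-- nonnegative bounds (PySem.List.slice_natCast_add / slice_to_natCast / slice_from_natCast).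
-- 'hi : 1 ≤ i' is a termination guard only (A's for-loop only calls it with i ≥ 1).
def aLoop (l : List Char) (i : Nat) (hi : 1 ≤ i) (j cnt : Nat) (token tmp : List Char) : List Char :=
  if j < l.length + 1 then
    if (l.drop j).take i = token then
      aLoop l i hi (j + i) (cnt + 1) token tmp
    else
      let tmp' := tmp ++ (if cnt ≠ 1 then PySem.Int.toChars (cnt : Int) ++ token else token)
      if l.length - j < token.length then tmp' ++ l.drop j
      else aLoop l i hi j 0 ((l.drop j).take i) tmp'
  else tmp
termination_by (l.length + 1 - j, if (l.drop j).take i = token then 0 else 1)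
decreasing_by
  · apply Prod.Lex.left; omega
  · simp only [if_pos]
    split
    · rename_i h; exact absurd h (by assumption)
    · apply Prod.Lex.right; omega

-- int(len(s)/2) = len(s)/2 exactly for every realizable length (< 2^53)
def solution (s : String) : Int :=
  let l := s.toList
  let array : List (List Char) :=
    [l] ++ (List.range' 1 (l.length / 2)).attach.map
      (fun x => aLoop l x.1 (List.mem_range'_1.mp x.2).1 0 0 (l.take x.1) [])
  let lens : List Int := array.map (fun t => (t.length : Int))
  match PySem.List.min? lens (fun x => x) with
  | some m => m
  | none => 0   -- unreachable: array always contains l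

-- ===== PORT B =====
-- the while-loop building the chunk list ('hi' is a termination guard only)
def bChunks (l : List Char) (i : Nat) (hi : 1 ≤ i) : List (List Char) :=
  if _h : l = [] then [] else l.take i :: bChunks (l.drop i) i hi
termination_by l.length
decreasing_by simp only [List.length_drop]; cases l with
  | nil => exact absurd rfl _h
  | cons a t => simp; omega

def bEnc (count : Nat) (prev : List Char) : Nat :=
  (if count > 1 then (PySem.Int.toChars (count : Int)).length else 0) + prev.length

-- the for-loop over chunks[1:] with state (prev, count, total)
def bGroup : List (List Char) → List Char → Nat → Nat → Nat
  | [], prev, count, total => total + bEnc count prev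
  | c :: rest, prev, count, total =>
    if c = prev then bGroup rest prev (count + 1) total
    else bGroup rest c 1 (total + bEnc count prev)

def solution_alt (s : String) : Int :=
  let l := s.toList
  let n := l.length
  ((List.range' 1 (n / 2)).attach.foldl
    (fun best x =>
      let chunks := bChunks l x.1 (List.mem_range'_1.mp x.2).1
      -- chunks[0]: headD [] is a totality default; chunks ≠ [] whenever 1 ≤ i ≤ n/2
      min best (bGroup (chunks.drop 1) (chunks.headD []) 1 0)) n : Nat)

-- ===== PRECONDITION & SPEC =====
def Spec_solution (s : String) (out : Int) : Prop := out = solution_alt s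
instance (s : String) (out : Int) : Decidable (Spec_solution s out) := by unfold Spec_solution; infer_instance

-- ===== CLAIM (what is proved, stated in full; the proofs are below) =====
def Claim_equal_solution : Prop := ∀ (s : String), Dom_solution s → Spec_solution s (solution s)

-- ===== LEMMAS AND PROOFS =====

lemma bGroup_shift (cs : List (List Char)) : ∀ prev count t,
    bGroup cs prev count t = t + bGroup cs prev count 0 := by
  induction cs with
  | nil => intro prev count t; simp [bGroup]
  | cons c rest ih =>
    intro prev count t
    by_cases h : c = prev
    · simp only [bGroup, if_pos h]
      exact ih prev (count + 1) t
    · simp only [bGroup, if_neg h]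
      rw [ih c 1 (t + bEnc count prev), ih c 1 (0 + bEnc count prev)]
      omega

lemma bChunks_nil (i : Nat) (hi : 1 ≤ i) : bChunks [] i hi = [] := by
  rw [bChunks]; simp

lemma bChunks_cons (l : List Char) (i : Nat) (hi : 1 ≤ i) (h : l ≠ []) :
    bChunks l i hi = l.take i :: bChunks (l.drop i) i hi := by
  rw [bChunks, dif_neg h]

lemma emit_len (cnt : Nat) (token : List Char) (hc : 1 ≤ cnt) :
    (if cnt ≠ 1 then PySem.Int.toChars (cnt : Int) ++ token else token).length
      = bEnc cnt token := by
  by_cases h : cnt = 1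
  · subst h; simp [bEnc]
  · rw [if_pos h]
    have h1 : 1 < cnt := by omega
    simp [bEnc, if_pos h1]

lemma aLoop_len (l : List Char) (i : Nat) (hi : 1 ≤ i) (j cnt : Nat) (token tmp : List Char)
    (hj : j ≤ l.length) (ht : token.length = i) (hc : 1 ≤ cnt) :
    (aLoop l i hi j cnt token tmp).length
      = tmp.length + bGroup (bChunks (l.drop j) i hi) token cnt 0 := by
  have hlt : j < l.length + 1 := by omega
  rw [aLoop, if_pos hlt]
  by_cases hm : (l.drop j).take i = token
  · -- matching chunk
    have hlen : ((l.drop j).take i).length = i := by rw [hm, ht]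
    have hni : i ≤ l.length - j := by
      simp only [List.length_take, List.length_drop] at hlen; omega
    have hne : l.drop j ≠ [] := by
      intro h; rw [h] at hlen; simp at hlen; omega
    rw [if_pos hm]
    rw [aLoop_len l i hi (j + i) (cnt + 1) token tmp (by omega) ht (by omega)]
    rw [bChunks_cons _ _ _ hne]
    simp only [bGroup, if_pos hm, List.drop_drop]
  · rw [if_neg hm]
    simp only
    by_cases hb : l.length - j < token.length
    · -- trailing partial chunk (or end of string): emit pending group, append s[j:]
      rw [if_pos hb]
      by_cases hnil : l.drop j = []
      · have hj' : l.length - j = 0 := by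
          have := congrArg List.length hnil; simp at this; omega
        rw [hnil, bChunks_nil]
        simp only [bGroup, List.append_nil, List.length_append, emit_len cnt token hc]
        omega
      · rw [bChunks_cons _ _ _ hnil]
        have htk : (l.drop j).take i = l.drop j := by
          apply List.take_of_length_le; simp; omega
        have hdp : (l.drop j).drop i = [] := by
          apply List.drop_eq_nil_of_le; simp; omega
        have hm' : l.drop j ≠ token := fun h => hm (htk.trans h)
        rw [hdp, bChunks_nil]
        rw [List.length_append, List.length_append, emit_len cnt token hc]
        simp only [bGroup, htk, if_neg hm']
        simp [bEnc]
        omega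
    · -- full mismatching chunk: reset (continue), next iteration matches
      rw [if_neg hb]
      rw [aLoop, if_pos hlt, if_pos rfl]
      have hlen : ((l.drop j).take i).length = i := by
        simp only [List.length_take, List.length_drop]; omega
      rw [aLoop_len l i hi (j + i) 1 ((l.drop j).take i) _ (by omega) hlen (by omega)]
      have hne : l.drop j ≠ [] := by
        intro h; rw [h] at hlen; simp at hlen; omega
      rw [bChunks_cons _ _ _ hne]
      simp only [bGroup, if_neg hm, List.drop_drop]
      conv_rhs => rw [bGroup_shift]
      rw [List.length_append, emit_len cnt token hc]
      omega
termination_by (l.length + 1 - j, if (l.drop j).take i = token then 0 else 1)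
decreasing_by
  · apply Prod.Lex.left; omega
  · apply Prod.Lex.left; omega

-- per chunk size i: A's compressed-string length = B's numeric total
lemma perI (l : List Char) (i : Nat) (hi : 1 ≤ i) (hin : i ≤ l.length / 2) :
    (aLoop l i hi 0 0 (l.take i) []).length
      = bGroup ((bChunks l i hi).drop 1) ((bChunks l i hi).headD []) 1 0 := by
  have hn : 2 * i ≤ l.length := by omega
  have hne : l ≠ [] := by intro h; rw [h] at hn; simp at hn; omega
  have ht : (l.take i).length = i := by simp; omega
  rw [aLoop, if_pos (by omega), if_pos (by simp)]
  simp only [Nat.zero_add]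
  rw [aLoop_len l i hi i 1 (l.take i) [] (by omega) ht (by omega)]
  rw [bChunks_cons _ _ _ hne]
  simp

lemma foldl_min_cast (xs : List α) (f : α → Nat) : ∀ init : Nat,
    (xs.map (fun x => ((f x : Nat) : Int))).foldl min (init : Int)
      = ((xs.foldl (fun b x => min b (f x)) init : Nat) : Int) := by
  induction xs with
  | nil => intro init; simp
  | cons a t ih =>
    intro init
    simp only [List.map_cons, List.foldl_cons]
    rw [← Nat.cast_min, ih]

theorem solution_eq_alt (s : String) : solution s = solution_alt s := by
  unfold solution solution_alt
  simp only [List.map_cons, List.map_map, List.singleton_append]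
  rw [PySem.List.min?_id_cons]
  simp only [Function.comp_def]
  rw [foldl_min_cast]
  congr 1
  apply PySem.List.foldl_congr_mem
  intro acc x hx
  have hmem := List.mem_range'_1.mp x.2
  congr 1
  exact perI s.toList x.1 hmem.1 (by omega)

-- ===== VERDICT (by name: the statement is the Claim_ definition above) =====
theorem solution_spec : Claim_equal_solution := by
  intro s _
  unfold Spec_solution
  exact solution_eq_alt s
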